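-- pv_equiv track=rewrite | github.com/TidalTunes/Maestro | packages/maestroxml/src/maestroxml/core.py | _parse_duration_spec
-- ===== SOURCE A (Python) =====
-- CANONICAL_DURATION_NAMES = {
--     "whole": "whole",
--     "half": "half",
--     "quarter": "quarter",
--     "eighth": "eighth",
--     "8th": "eighth",
--     "16th": "16th",
--     "sixteenth": "16th",
--     "32nd": "32nd",
--     "thirty-second": "32nd",
--     "thirty second": "32nd",
--     "64th": "64th",
--     "sixty-fourth": "64th",
--     "sixty fourth": "64th",
-- }
--
-- def _normalize_duration_name(duration: str) -> str:
--     candidate = duration.strip().lower()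
--     canonical = CANONICAL_DURATION_NAMES.get(candidate)
--     if canonical is None:
--         canonical = CANONICAL_DURATION_NAMES.get(candidate.replace("-", " "))
--     if canonical is None:
--         raise ValueError(f"Unsupported duration name: {duration!r}")
--     return canonical
--
-- def _parse_duration_spec(duration: str, dots: int = 0) -> tuple[str, int]:
--     cleaned = duration.strip().lower()
--     normalized = " ".join(cleaned.replace("-", " ").split())
--     total_dots = int(dots or 0)
--     if total_dots < 0:
--         raise ValueError("Dots must be a non-negative integer")
--
--     dotted_prefixes = (
--         ("single dotted ", 1),
--         ("double dotted ", 2),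
--         ("triple dotted ", 3),
--         ("dotted ", 1),
--     )
--
--     for prefix, implied_dots in dotted_prefixes:
--         if normalized.startswith(prefix):
--             normalized = normalized[len(prefix) :].strip()
--             total_dots += implied_dots
--             break
--
--     duration_name = _normalize_duration_name(normalized)
--     return duration_name, total_dots
-- ===== SOURCE B (Python) =====
-- CANONICAL_DURATION_NAMES = {
--     "whole": "whole",
--     "half": "half",
--     "quarter": "quarter",
--     "eighth": "eighth",
--     "8th": "eighth",
--     "16th": "16th",
--     "sixteenth": "16th",
--     "32nd": "32nd",
--     "thirty-second": "32nd",
--     "thirty second": "32nd",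
--     "64th": "64th",
--     "sixty-fourth": "64th",
--     "sixty fourth": "64th",
-- }
--
-- _MODIFIER_DOTS = {"single": 1, "double": 2, "triple": 3}
--
--
-- def _parse_duration_spec(duration: str, dots: int = 0) -> tuple[str, int]:
--     total_dots = int(dots or 0)
--     if total_dots < 0:
--         raise ValueError("Dots must be a non-negative integer")
--
--     tokens = duration.strip().lower().replace("-", " ").split()
--
--     # Recognize a leading dot-modifier by pattern-matching the first tokens,
--     # but only when at least one base token remains after it.
--     if len(tokens) >= 3 and tokens[0] in _MODIFIER_DOTS and tokens[1] == "dotted":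
--         total_dots += _MODIFIER_DOTS[tokens[0]]
--         tokens = tokens[2:]
--     elif len(tokens) >= 2 and tokens[0] == "dotted":
--         total_dots += 1
--         tokens = tokens[1:]
--
--     base = " ".join(tokens)
--     canonical = CANONICAL_DURATION_NAMES.get(base)
--     if canonical is None:
--         raise ValueError(f"Unsupported duration name: {base!r}")
--     return canonical, total_dots
-- ===== Notes on version B (the rewrite author's own statement) =====
-- stated objective: alternative
-- what changed: Instead of A's startswith-loop over dotted-prefix strings with slicing, B splits the normalized input into word tokens, pattern-matches the leading dot-modifier tokens (consuming it only when base tokens remain), and looks up the rejoined remainder.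
import Mathlib
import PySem

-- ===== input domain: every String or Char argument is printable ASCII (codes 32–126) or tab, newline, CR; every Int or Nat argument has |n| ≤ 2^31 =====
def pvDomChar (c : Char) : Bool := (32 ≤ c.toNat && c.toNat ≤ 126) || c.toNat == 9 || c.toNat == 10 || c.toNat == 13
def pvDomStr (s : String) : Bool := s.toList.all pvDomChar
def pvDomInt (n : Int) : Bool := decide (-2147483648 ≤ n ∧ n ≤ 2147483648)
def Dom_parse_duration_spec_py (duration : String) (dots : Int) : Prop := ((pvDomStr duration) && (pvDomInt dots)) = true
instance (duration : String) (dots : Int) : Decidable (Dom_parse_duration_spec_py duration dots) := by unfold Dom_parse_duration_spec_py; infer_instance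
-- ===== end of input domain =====

-- B re-parses the duration spec by tokenizing and pattern-matching the leading dot-modifier tokens
-- instead of A's startswith-loop over dotted prefixes (objective: alternative decomposition, same cost).
-- On inputs where the Python A raises ValueError (negative dots, unsupported name) the ports return a
-- dummy value; Pre_ excludes exactly those inputs.

-- ===== PORT A =====
def CANONICAL_DURATION_NAMES : PySem.Dict String String := PySem.Dict.ofList
  [("whole","whole"),("half","half"),("quarter","quarter"),("eighth","eighth"),("8th","eighth"),
   ("16th","16th"),("sixteenth","16th"),("32nd","32nd"),("thirty-second","32nd"),("thirty second","32nd"),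
   ("64th","64th"),("sixty-fourth","64th"),("sixty fourth","64th")]

-- _normalize_duration_name; on the 'raise ValueError' branch returns "" (excluded by Pre_)
def normalize_duration_name_py (duration : String) : String :=
  match PySem.Dict.get? CANONICAL_DURATION_NAMES (PySem.Str.lower (PySem.Str.strip duration)) with
  | some c => c
  | none =>
    match PySem.Dict.get? CANONICAL_DURATION_NAMES
        (PySem.Str.replace (PySem.Str.lower (PySem.Str.strip duration)) "-" " ") with
    | some c => c
    | none => ""  -- raise ValueError(f"Unsupported duration name: ...")

-- the 'for prefix, implied_dots in dotted_prefixes: ... break' loop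
def dotted_prefix_loop : List (String × Int) → String → Int → String × Int
  | [], normalized, total_dots => (normalized, total_dots)
  | (p, implied) :: rest, normalized, total_dots =>
    if PySem.Str.startswith normalized p then
      (PySem.Str.strip (PySem.Str.slice normalized (some (PySem.Str.len p : Int)) none), total_dots + implied)
    else dotted_prefix_loop rest normalized total_dots

def parse_duration_spec_py (duration : String) (dots : Int) : String × Int :=
  -- total_dots = int(dots or 0) = dots for an int argument; raise branches return a dummy (outside Pre_)
  if dots < 0 then ("", dots)  -- raise ValueError("Dots must be a non-negative integer")
  else
    let nd := dotted_prefix_loop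
      [("single dotted ", 1), ("double dotted ", 2), ("triple dotted ", 3), ("dotted ", 1)]
      (PySem.Str.join " " (PySem.Str.split₀
        (PySem.Str.replace (PySem.Str.lower (PySem.Str.strip duration)) "-" " ")))
      dots
    (normalize_duration_name_py nd.1, nd.2)

-- ===== PORT B =====
def MODIFIER_DOTS : PySem.Dict String Int := PySem.Dict.ofList
  [("single", 1), ("double", 2), ("triple", 3)]

-- modifier recognition + base lookup on the token list (the code after B's dots check)
def alt_body (tokens : List String) (total_dots : Int) : String × Int :=
  let tt : List String × Int :=
    if tokens.length ≥ 3 ∧ (PySem.Dict.get? MODIFIER_DOTS (tokens.getD 0 "")).isSome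
        ∧ tokens.getD 1 "" = "dotted" then
      (tokens.drop 2, total_dots + (PySem.Dict.get? MODIFIER_DOTS (tokens.getD 0 "")).getD 0)
    else if tokens.length ≥ 2 ∧ tokens.getD 0 "" = "dotted" then
      (tokens.drop 1, total_dots + 1)
    else (tokens, total_dots)
  match PySem.Dict.get? CANONICAL_DURATION_NAMES (PySem.Str.join " " tt.1) with
  | some c => (c, tt.2)
  | none => ("", tt.2)  -- raise ValueError(f"Unsupported duration name: ...")

def parse_duration_spec_py_alt (duration : String) (dots : Int) : String × Int :=
  if dots < 0 then ("", dots)  -- raise ValueError("Dots must be a non-negative integer")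
  else
    alt_body (PySem.Str.split₀
      (PySem.Str.replace (PySem.Str.lower (PySem.Str.strip duration)) "-" " ")) dots

-- ===== PRECONDITION & SPEC =====
-- the normalized word tokens of the input (shared normalization both programs perform)
def pvToks (duration : String) : List String :=
  PySem.Str.split₀ (PySem.Str.replace (PySem.Str.lower (PySem.Str.strip duration)) "-" " ")

def pvBaseToks : List (List String) :=
  [["whole"], ["half"], ["quarter"], ["eighth"], ["8th"], ["16th"], ["sixteenth"],
   ["32nd"], ["thirty", "second"], ["64th"], ["sixty", "fourth"]]

-- the 55 supported phrases: an optional dot-modifier followed by a supported base name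
def pvValidToks : List (List String) :=
  pvBaseToks ++ pvBaseToks.map (["dotted"] ++ ·) ++ pvBaseToks.map (["single", "dotted"] ++ ·)
    ++ pvBaseToks.map (["double", "dotted"] ++ ·) ++ pvBaseToks.map (["triple", "dotted"] ++ ·)

-- Pre_ = exactly the inputs on which Python A returns: non-negative dots and a supported phrase
-- (on all other inputs A raises ValueError).
def Pre_parse_duration_spec_py (duration : String) (dots : Int) : Prop :=
  0 ≤ dots ∧ pvToks duration ∈ pvValidToks
instance (duration : String) (dots : Int) : Decidable (Pre_parse_duration_spec_py duration dots) := by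
  unfold Pre_parse_duration_spec_py; infer_instance

def pvWitness_parse_duration_spec_py : String × Int := ("Double-Dotted Quarter", 1)

def Spec_parse_duration_spec_py (duration : String) (dots : Int) (out : String × Int) : Prop :=
  out = parse_duration_spec_py_alt duration dots
instance (duration : String) (dots : Int) (out : String × Int) :
    Decidable (Spec_parse_duration_spec_py duration dots out) := by
  unfold Spec_parse_duration_spec_py; infer_instance

-- ===== CLAIM (what is proved, stated in full; the proofs are below) =====
def Claim_equal_parse_duration_spec_py : Prop := ∀ (duration : String) (dots : Int), Dom_parse_duration_spec_py duration dots → Pre_parse_duration_spec_py duration dots → Spec_parse_duration_spec_py duration dots (parse_duration_spec_py duration dots)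

-- ===== LEMMAS AND PROOFS =====

-- proof-only helpers: the two ports with the symbolic dot count factored out (dots = 0)
def A_core (t : List String) : String × Int :=
  let nd := dotted_prefix_loop
    [("single dotted ", 1), ("double dotted ", 2), ("triple dotted ", 3), ("dotted ", 1)]
    (PySem.Str.join " " t) 0
  (normalize_duration_name_py nd.1, nd.2)

def B_core (t : List String) : String × Int := alt_body t 0

lemma loop_shift (P : List (String × Int)) (n : String) (t : Int) :
    dotted_prefix_loop P n t = ((dotted_prefix_loop P n 0).1, t + (dotted_prefix_loop P n 0).2) := by
  induction P generalizing n t with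
  | nil => simp [dotted_prefix_loop]
  | cons p rest ih =>
    obtain ⟨pfx, k⟩ := p
    simp only [dotted_prefix_loop]
    split_ifs with h
    · simp only [zero_add]
    · exact ih n t

lemma A_factor (duration : String) (dots : Int) (h : ¬ dots < 0) :
    parse_duration_spec_py duration dots
      = ((A_core (pvToks duration)).1, dots + (A_core (pvToks duration)).2) := by
  unfold parse_duration_spec_py A_core pvToks
  rw [if_neg h]
  rw [loop_shift _ _ dots]

lemma alt_body_shift (t : List String) (dots : Int) :
    alt_body t dots = ((alt_body t 0).1, dots + (alt_body t 0).2) := by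
  unfold alt_body
  split_ifs with h1 h2
  · cases hget : PySem.Dict.get? CANONICAL_DURATION_NAMES (PySem.Str.join " " (t.drop 2)) <;>
      simp only [hget] <;> simp
  · cases hget : PySem.Dict.get? CANONICAL_DURATION_NAMES (PySem.Str.join " " (t.drop 1)) <;>
      simp only [hget] <;> simp
  · cases hget : PySem.Dict.get? CANONICAL_DURATION_NAMES (PySem.Str.join " " t) <;>
      simp only [hget] <;> simp

lemma B_factor (duration : String) (dots : Int) (h : ¬ dots < 0) :
    parse_duration_spec_py_alt duration dots
      = ((B_core (pvToks duration)).1, dots + (B_core (pvToks duration)).2) := by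
  unfold parse_duration_spec_py_alt B_core pvToks
  rw [if_neg h, alt_body_shift]

set_option maxRecDepth 4000 in
lemma cores_eq : ∀ t ∈ pvValidToks, A_core t = B_core t := by decide

-- ===== VERDICT (by name: the statement is the Claim_ definition above) =====
theorem parse_duration_spec_py_spec : Claim_equal_parse_duration_spec_py := by
  intro duration dots _ hpre
  obtain ⟨hd, hmem⟩ := hpre
  have h : ¬ dots < 0 := by omega
  unfold Spec_parse_duration_spec_py
  rw [A_factor _ _ h, B_factor _ _ h, cores_eq _ hmem]
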